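-- pv_equiv track=rewrite | github.com/liupengsay/PyIsTheBestLang | algorithm/src/dp/digital_dp.py | compute_digit
-- ===== SOURCE A (Python) =====
-- def compute_digit(num, d):
--     # 使用进制计算第num个不含数字d的数 0<=d<=9
--     lst = []
--     st = list(range(10))
--     st.remove(d)
--     while num:
--         if d:
--             lst.append(num % 9)
--             num //= 9
--         else:
--             lst.append((num - 1) % 9)
--             num = (num - 1) // 9
--     lst.reverse()
--     # 也可以使用二分加数位DP进行求解
--     ans = [str(st[i]) for i in lst]
--     return int("".join(ans))
-- ===== SOURCE B (Python) =====
-- def compute_digit(num, d):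
--     # num-th positive integer containing no digit d, computed front-to-back:
--     # first find the digit-length L (closed-form rank offsets), then extract the
--     # most-significant digits of the rank by dividing by powers of 9.
--     if d:
--         L, m = 1, num
--         while 9 ** L <= num:
--             L += 1
--     else:
--         L = 1
--         while (9 ** (L + 1) - 9) // 8 < num:
--             L += 1
--         m = num - (9 ** L - 9) // 8 - 1
--     s = ""
--     for i in range(L):
--         r = m // 9 ** (L - 1 - i) % 9
--         v = r + 1 if d == 0 else (r + 1 if r >= d else r)
--         s += str(v)
--     return int(s)
-- ===== Notes on version B (the rewrite author's own statement) =====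
-- stated objective: alternative
-- what changed: Instead of collecting base-9 remainders least-significant-first into a list, reversing, and mapping them through the digit table list(range(10)).remove(d), B first computes the answer's digit-length L from closed-form rank offsets and then emits the digits most-significant-first by dividing the rank by powers of 9, mapping each remainder arithmetically (r -> r+1 when d==0 or r>=d).
import Mathlib
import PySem

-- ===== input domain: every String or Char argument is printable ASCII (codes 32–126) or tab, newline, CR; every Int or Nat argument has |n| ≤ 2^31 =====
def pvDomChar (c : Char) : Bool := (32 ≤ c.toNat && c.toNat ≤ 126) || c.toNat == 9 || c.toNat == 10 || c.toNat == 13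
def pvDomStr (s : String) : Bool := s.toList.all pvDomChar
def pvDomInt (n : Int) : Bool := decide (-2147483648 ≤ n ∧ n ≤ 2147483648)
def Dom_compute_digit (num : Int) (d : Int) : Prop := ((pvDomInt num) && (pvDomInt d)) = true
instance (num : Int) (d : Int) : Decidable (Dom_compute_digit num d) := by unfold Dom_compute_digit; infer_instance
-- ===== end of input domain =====

-- B replaces A's least-significant-first remainder loop + digit-table lookup by a
-- front-to-back construction: digit-length first (closed-form rank offsets), then
-- most-significant digits by dividing by powers of 9 (objective: alternative).

-- ===== PORT A =====
-- `while num:` loop of A, with a fuel counter that only totalizes the function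
-- (Python loops forever for num < 0; for num ≥ 1 the value strictly decreases,
-- so `num.toNat` fuel is enough and the port computes exactly the Python loop).
def pvALoopF (d : Int) : Nat → Int → List Int
  | 0, _ => []
  | fuel + 1, num =>
    if num ≤ 0 then []
    else if d ≠ 0 then
      PySem.Int.mod num 9 :: pvALoopF d fuel (PySem.Int.floordiv num 9)
    else
      PySem.Int.mod (num - 1) 9 :: pvALoopF d fuel (PySem.Int.floordiv (num - 1) 9)

def pvALoop (d : Int) (num : Int) : List Int := pvALoopF d num.toNat num

def compute_digit (num : Int) (d : Int) : Int :=
  -- st = list(range(10)); st.remove(d)  (ValueError when d ∉ st: outside Pre_)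
  let st := (PySem.List.remove? (PySem.List.pyRange 0 10) d).getD []
  let lst := pvALoop d num
  let lst2 := lst.reverse
  -- ans = [str(st[i]) for i in lst]  (st[i] with i ∈ [0,8] under Pre_)
  let ans := lst2.map (fun i => PySem.Int.toStr (PySem.List.pyGetD st i 0))
  -- int("".join(ans))  (ValueError on the empty string, i.e. num = 0: outside Pre_)
  (PySem.Int.ofStr? (PySem.Str.join "" ans)).getD 0

-- ===== PORT B =====
-- `while 9 ** L <= num: L += 1`: L starts at 1 and the loop runs < num times, so
-- `num.toNat + 1` fuel only totalizes; `.toNat` on the exponent is exact (L ≥ 1).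
def pvBLenF (num : Int) : Nat → Int → Int
  | 0, L => L
  | fuel + 1, L =>
    if (9:Int) ^ L.toNat ≤ num then pvBLenF num fuel (L + 1) else L

def pvBLen (num : Int) (L : Int) : Int := pvBLenF num (num.toNat + 1) L

-- `while (9 ** (L + 1) - 9) // 8 < num: L += 1`, totalized the same way.
def pvBLen0F (num : Int) : Nat → Int → Int
  | 0, L => L
  | fuel + 1, L =>
    if PySem.Int.floordiv ((9:Int) ^ (L + 1).toNat - 9) 8 < num then
      pvBLen0F num fuel (L + 1)
    else L

def pvBLen0 (num : Int) (L : Int) : Int := pvBLen0F num (num.toNat + 1) L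

def compute_digit_alt (num : Int) (d : Int) : Int :=
  let Lm : Int × Int :=
    if d ≠ 0 then
      (pvBLen num 1, num)
    else
      let L := pvBLen0 num 1
      (L, num - PySem.Int.floordiv ((9:Int) ^ L.toNat - 9) 8 - 1)
  let L := Lm.1
  let m := Lm.2
  -- for i in range(L): ... s += str(v)   — the string s is ported at the
  -- character-list level (exact: Python string concatenation = list append);
  -- 9 ** (L - 1 - i) has L - 1 - i ≥ 0 for i ∈ range(L), so `.toNat` is exact.
  let s := (PySem.List.pyRange 0 L).foldl
      (fun cs i =>
        let r := PySem.Int.mod (PySem.Int.floordiv m ((9:Int) ^ (L - 1 - i).toNat)) 9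
        let v := if d = 0 then r + 1 else if d ≤ r then r + 1 else r
        cs ++ PySem.Int.toChars v) []
  -- int(s)  (ValueError on the empty string: outside Pre_)
  (PySem.Int.ofChars? s).getD 0

-- ===== PRECONDITION & SPEC =====
-- Pre_ excludes exactly the inputs where Python A does not return normally:
-- d ∉ [0,9] (st.remove raises ValueError), num = 0 (int("") raises ValueError),
-- num < 0 (the while loop never terminates).
def Pre_compute_digit (num : Int) (d : Int) : Prop := 1 ≤ num ∧ 0 ≤ d ∧ d ≤ 9
instance (num : Int) (d : Int) : Decidable (Pre_compute_digit num d) := by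
  unfold Pre_compute_digit; infer_instance

def pvWitness_compute_digit : Int × Int := (10, 3)

def Spec_compute_digit (num : Int) (d : Int) (out : Int) : Prop := out = compute_digit_alt num d
instance (num : Int) (d : Int) (out : Int) : Decidable (Spec_compute_digit num d out) := by
  unfold Spec_compute_digit; infer_instance

-- ===== CLAIM (what is proved, stated in full; the proofs are below) =====
def Claim_equal_compute_digit : Prop := ∀ (num : Int) (d : Int), Dom_compute_digit num d → Pre_compute_digit num d → Spec_compute_digit num d (compute_digit num d)

-- ===== LEMMAS AND PROOFS =====

-- the loop values strictly decrease, so the fuel given to pvALoopF suffices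
lemma pvDecA1 (num : Int) (h : ¬ num ≤ 0) : (PySem.Int.floordiv num 9).toNat < num.toNat := by
  rw [PySem.Int.floordiv_eq_ediv_of_pos (by norm_num)]; omega

lemma pvDecA2 (num : Int) (h : ¬ num ≤ 0) : (PySem.Int.floordiv (num - 1) 9).toNat < num.toNat := by
  rw [PySem.Int.floordiv_eq_ediv_of_pos (by norm_num)]; omega

-- any sufficient fuel computes the same list
lemma pvALoopF_congr (d : Int) : ∀ (f₁ f₂ : Nat) (n : Int), n.toNat ≤ f₁ → n.toNat ≤ f₂ →
    pvALoopF d f₁ n = pvALoopF d f₂ n := by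
  intro f₁
  induction f₁ with
  | zero =>
    intro f₂ n h1 h2
    have hn : n ≤ 0 := by omega
    cases f₂ with
    | zero => rfl
    | succ g => simp [pvALoopF, hn]
  | succ f ihf =>
    intro f₂ n h1 h2
    cases f₂ with
    | zero =>
      have hn : n ≤ 0 := by omega
      simp [pvALoopF, hn]
    | succ g =>
      by_cases hn : n ≤ 0
      · simp [pvALoopF, hn]
      · rw [pvALoopF, pvALoopF, if_neg hn, if_neg hn]
        by_cases hd : d ≠ 0
        · rw [if_pos hd, if_pos hd]
          have := pvDecA1 n hn
          rw [ihf g _ (by omega) (by omega)]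
        · rw [if_neg hd, if_neg hd]
          have := pvDecA2 n hn
          rw [ihf g _ (by omega) (by omega)]

-- pvALoop satisfies the Python loop's recurrence
lemma pvALoop_eq (d num : Int) :
    pvALoop d num = if num ≤ 0 then [] else if d ≠ 0 then
      PySem.Int.mod num 9 :: pvALoop d (PySem.Int.floordiv num 9)
    else
      PySem.Int.mod (num - 1) 9 :: pvALoop d (PySem.Int.floordiv (num - 1) 9) := by
  unfold pvALoop
  by_cases hn : num ≤ 0
  · have h0 : num.toNat = 0 := by omega
    rw [h0]
    simp [pvALoopF, hn]
  · have hk : num.toNat = (num.toNat - 1) + 1 := by omega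
    rw [hk, pvALoopF, if_neg hn, if_neg hn]
    by_cases hd : d ≠ 0
    · rw [if_pos hd, if_pos hd]
      have := pvDecA1 num hn
      rw [pvALoopF_congr d (num.toNat - 1) (PySem.Int.floordiv num 9).toNat _ (by omega) (le_refl _)]
    · rw [if_neg hd, if_neg hd]
      have := pvDecA2 num hn
      rw [pvALoopF_congr d (num.toNat - 1) (PySem.Int.floordiv (num - 1) 9).toNat _ (by omega) (le_refl _)]

-- every element A's loop produces is a remainder mod 9
lemma pvALoopF_mem (d : Int) : ∀ (f : Nat) (num : Int), ∀ x ∈ pvALoopF d f num, 0 ≤ x ∧ x ≤ 8 := by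
  intro f
  induction f with
  | zero => intro num x hx; simp [pvALoopF] at hx
  | succ f ih =>
    intro num x hx
    rw [pvALoopF] at hx
    by_cases hn : num ≤ 0
    · rw [if_pos hn] at hx; simp at hx
    · rw [if_neg hn] at hx
      by_cases hd : d ≠ 0
      · rw [if_pos hd] at hx
        rcases List.mem_cons.mp hx with h' | h'
        · subst h'
          have := PySem.Int.mod_nonneg num (b := 9) (by norm_num)
          have := PySem.Int.mod_lt num (b := 9) (by norm_num)
          omega
        · exact ih _ x h'
      · rw [if_neg hd] at hx
        rcases List.mem_cons.mp hx with h' | h'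
        · subst h'
          have := PySem.Int.mod_nonneg (num - 1) (b := 9) (by norm_num)
          have := PySem.Int.mod_lt (num - 1) (b := 9) (by norm_num)
          omega
        · exact ih _ x h'

lemma pvALoop_mem (d num : Int) : ∀ x ∈ pvALoop d num, 0 ≤ x ∧ x ≤ 8 :=
  pvALoopF_mem d num.toNat num

-- rank offsets: pvS L = (9^L - 9)/8 = number of no-zero-digit integers with < L digits
def pvS : Nat → Int
  | 0 => -1
  | L + 1 => 9 * pvS L + 9

lemma pvS_eq (L : Nat) : 8 * pvS L = 9 ^ L - 9 := by
  induction L with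
  | zero => simp [pvS]
  | succ L ih => simp only [pvS, pow_succ]; linarith

lemma pvSfd (L : Nat) : PySem.Int.floordiv ((9:Int) ^ L - 9) 8 = pvS L := by
  rw [PySem.Int.floordiv_eq_ediv_of_pos (by norm_num)]
  have := pvS_eq L
  omega

lemma pvS_nonneg (L : Nat) : 0 ≤ pvS (L + 1) := by
  have h := pvS_eq (L + 1)
  have h2 : (9:Int) ≤ 9 ^ (L + 1) := by
    calc (9:Int) = 9 ^ 1 := by norm_num
    _ ≤ 9 ^ (L + 1) := by apply pow_le_pow_right₀ <;> omega
  omega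

-- the digit list B's loop reads off: m's base-9 digits, most significant first, L of them
def pvBList (m : Int) (L : Nat) : List Int :=
  (List.range L).map (fun i => m / 9 ^ (L - 1 - i) % 9)

lemma pvBList_split (m : Int) (L : Nat) :
    pvBList m (L + 1) = pvBList (m / 9) L ++ [m % 9] := by
  unfold pvBList
  rw [List.range_succ, List.map_append]
  congr 1
  · apply List.map_congr_left
    intro i hi
    simp only [List.mem_range] at hi
    have h1 : L + 1 - 1 - i = (L - 1 - i) + 1 := by omega
    rw [h1, pow_succ, mul_comm ((9:Int) ^ (L - 1 - i)) 9,
      ← Int.ediv_ediv_of_nonneg (by norm_num)]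
  · simp

-- A's remainder list, reversed, is exactly B's digit list (d ≠ 0: plain base 9)
lemma pvM1 (d : Int) (hd : d ≠ 0) : ∀ (L : Nat) (n : Int), 9 ^ L ≤ n → n < 9 ^ (L + 1) →
    (pvALoop d n).reverse = pvBList n (L + 1) := by
  intro L
  induction L with
  | zero =>
    intro n h1 h2
    simp only [pow_zero] at h1 h2
    rw [pvALoop_eq, if_neg (by omega), if_pos hd]
    rw [PySem.Int.mod_eq_emod_of_pos (by norm_num),
      PySem.Int.floordiv_eq_ediv_of_pos (by norm_num)]
    have hz : n / 9 = 0 := by omega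
    rw [hz]
    rw [pvALoop_eq]
    simp only [le_refl, if_pos]
    unfold pvBList
    simp only [List.range_one, List.map_nil, List.reverse_cons, List.reverse_nil,
      List.nil_append]
    have : n % 9 = n := by omega
    simp [this]
  | succ L ih =>
    intro n h1 h2
    have hps : (9:Int) ^ (L + 1) = 9 * 9 ^ L := by ring
    have hps2 : (9:Int) ^ (L + 2) = 9 * 9 ^ (L + 1) := by ring
    have hpow : (0:Int) < 9 ^ L := by positivity
    have hn : 0 < n := by omega
    rw [pvALoop_eq, if_neg (by omega), if_pos hd]
    rw [PySem.Int.mod_eq_emod_of_pos (by norm_num),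
      PySem.Int.floordiv_eq_ediv_of_pos (by norm_num)]
    rw [List.reverse_cons]
    have hb1 : 9 ^ L ≤ n / 9 := by omega
    have hb2 : n / 9 < 9 ^ (L + 1) := by omega
    rw [ih (n / 9) hb1 hb2]
    conv_rhs => rw [pvBList_split]

-- A's remainder list, reversed, is B's digit list of the rank (d = 0: bijective base 9)
lemma pvM2 : ∀ (L : Nat) (n : Int), pvS L < n → n ≤ pvS (L + 1) →
    (pvALoop 0 n).reverse = pvBList (n - pvS L - 1) L := by
  intro L
  induction L with
  | zero =>
    intro n h1 h2
    simp only [pvS] at h1 h2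
    have : n = 0 := by omega
    subst this
    rw [pvALoop_eq, if_pos le_rfl]
    simp [pvBList]
  | succ L ih =>
    intro n h1 h2
    have hrec : pvS (L + 1) = 9 * pvS L + 9 := rfl
    have hrec2 : pvS (L + 1 + 1) = 9 * pvS (L + 1) + 9 := rfl
    have hpos : 0 < n := by have := pvS_nonneg L; omega
    rw [pvALoop_eq, if_neg (by omega), if_neg (show ¬((0:Int) ≠ 0) by simp)]
    rw [PySem.Int.mod_eq_emod_of_pos (by norm_num),
      PySem.Int.floordiv_eq_ediv_of_pos (by norm_num)]
    rw [List.reverse_cons]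
    have hb1 : pvS L < (n - 1) / 9 := by omega
    have hb2 : (n - 1) / 9 ≤ pvS (L + 1) := by omega
    rw [ih ((n - 1) / 9) hb1 hb2]
    rw [pvBList_split]
    have e1 : (n - pvS (L + 1) - 1) / 9 = (n - 1) / 9 - pvS L - 1 := by omega
    have e2 : (n - pvS (L + 1) - 1) % 9 = (n - 1) % 9 := by omega
    rw [e1, e2]

-- B's length loop with enough fuel: the smallest L with num < 9^L
lemma pvBLenF_spec (num : Int) : ∀ (f : Nat) (L : Int), 1 ≤ L → num.toNat < f + L.toNat →
    9 ^ (L.toNat - 1) ≤ num →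
    1 ≤ pvBLenF num f L ∧ 9 ^ ((pvBLenF num f L).toNat - 1) ≤ num ∧
      num < 9 ^ (pvBLenF num f L).toNat := by
  intro f
  induction f with
  | zero =>
    intro L hL hf hinv
    simp only [pvBLenF]
    refine ⟨hL, hinv, ?_⟩
    have h1 : (L.toNat : Int) < (9:Int) ^ L.toNat := by
      exact_mod_cast Nat.lt_pow_self (a := 9) (by norm_num) (n := L.toNat)
    have h2 : (0:Int) < 9 ^ (L.toNat - 1) := by positivity
    omega
  | succ f ih =>
    intro L hL hf hinv
    rw [pvBLenF]
    split_ifs with h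
    · apply ih (L + 1) (by omega) (by omega)
      have h3 : (L + 1).toNat - 1 = L.toNat := by omega
      rw [h3]
      exact h
    · exact ⟨hL, hinv, by omega⟩

lemma pvBLen_spec (num : Int) : ∀ L : Int, 1 ≤ L → 9 ^ (L.toNat - 1) ≤ num →
    1 ≤ pvBLen num L ∧ 9 ^ ((pvBLen num L).toNat - 1) ≤ num ∧ num < 9 ^ (pvBLen num L).toNat := by
  intro L hL hinv
  exact pvBLenF_spec num (num.toNat + 1) L hL (by omega) hinv

-- B's length loop for d = 0: the L with pvS L < num ≤ pvS (L+1)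
lemma pvBLen0F_spec (num : Int) : ∀ (f : Nat) (L : Int), 1 ≤ L → num.toNat < f + L.toNat →
    pvS L.toNat < num →
    1 ≤ pvBLen0F num f L ∧ pvS (pvBLen0F num f L).toNat < num ∧
      num ≤ pvS ((pvBLen0F num f L).toNat + 1) := by
  intro f
  induction f with
  | zero =>
    intro L hL hf hinv
    simp only [pvBLen0F]
    refine ⟨hL, hinv, ?_⟩
    have e1 := pvS_eq (L.toNat + 1)
    have e2 : ((L.toNat : Int) + 1) ≤ (9:Int) ^ L.toNat := by
      exact_mod_cast Nat.lt_pow_self (a := 9) (by norm_num) (n := L.toNat)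
    have e3 : (9:Int) ^ (L.toNat + 1) = 9 * 9 ^ L.toNat := by ring
    have e4 : 0 ≤ pvS L.toNat := by
      have h5 : L.toNat = (L.toNat - 1) + 1 := by omega
      rw [h5]; exact pvS_nonneg _
    omega
  | succ f ih =>
    intro L hL hf hinv
    rw [pvBLen0F]
    split_ifs with h
    · apply ih (L + 1) (by omega) (by omega)
      rw [pvSfd] at h
      exact h
    · rw [pvSfd] at h
      have h3 : (L + 1).toNat = L.toNat + 1 := by omega
      rw [h3] at h
      exact ⟨hL, hinv, by omega⟩

lemma pvBLen0_spec (num : Int) : ∀ L : Int, 1 ≤ L → pvS L.toNat < num →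
    1 ≤ pvBLen0 num L ∧ pvS (pvBLen0 num L).toNat < num ∧
      num ≤ pvS ((pvBLen0 num L).toNat + 1) := by
  intro L hL hinv
  exact pvBLen0F_spec num (num.toNat + 1) L hL (by omega) hinv

lemma pvBLenF_pos (num : Int) : ∀ (f : Nat) (L : Int), 1 ≤ L → 1 ≤ pvBLenF num f L := by
  intro f
  induction f with
  | zero => intro L hL; simpa [pvBLenF] using hL
  | succ f ih =>
    intro L hL
    rw [pvBLenF]
    split_ifs with h
    · exact ih (L + 1) (by omega)
    · exact hL

lemma pvBLen0F_pos (num : Int) : ∀ (f : Nat) (L : Int), 1 ≤ L → 1 ≤ pvBLen0F num f L := by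
  intro f
  induction f with
  | zero => intro L hL; simpa [pvBLen0F] using hL
  | succ f ih =>
    intro L hL
    rw [pvBLen0F]
    split_ifs with h
    · exact ih (L + 1) (by omega)
    · exact hL

lemma pvBLen_pos (num : Int) : ∀ L : Int, 1 ≤ L → 1 ≤ pvBLen num L := fun L hL =>
  pvBLenF_pos num (num.toNat + 1) L hL

lemma pvBLen0_pos (num : Int) : ∀ L : Int, 1 ≤ L → 1 ≤ pvBLen0 num L := fun L hL =>
  pvBLen0F_pos num (num.toNat + 1) L hL

-- joining with the empty separator is concatenation
lemma pvJoin_nil_flatten (l : List (List Char)) : PySem.Chars.join [] l = l.flatten := by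
  induction l with
  | nil => simp [PySem.Chars.join_nil]
  | cons p rest ih =>
    cases rest with
    | nil => simp [PySem.Chars.join_singleton]
    | cons q r =>
      rw [PySem.Chars.join_cons_cons]
      simp only [List.flatten_cons] at *
      simp [ih]

-- A's table lookup st[i] computed arithmetically
def pvBump (d i : Int) : Int := if d = 0 then i + 1 else if d ≤ i then i + 1 else i

lemma pvSt_lookup (d i : Int) (hd0 : 0 ≤ d) (hd9 : d ≤ 9) (hi0 : 0 ≤ i) (hi8 : i ≤ 8) :
    PySem.List.pyGetD ((PySem.List.remove? (PySem.List.pyRange 0 10) d).getD []) i 0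
      = pvBump d i := by
  unfold pvBump
  interval_cases d <;> interval_cases i <;> decide

lemma pvOfStr_toList (s : String) : PySem.Int.ofStr? s = PySem.Int.ofChars? s.toList := by
  rw [← PySem.Int.ofStr?_ofList]
  congr 1
  exact String.ofList_toList.symm

-- A's result as characters
lemma pvA_chars (num d : Int) (hd0 : 0 ≤ d) (hd9 : d ≤ 9) :
    compute_digit num d =
      (PySem.Int.ofChars?
        (((pvALoop d num).reverse.map (fun i => PySem.Int.toChars (pvBump d i))).flatten)).getD 0 := by
  simp only [compute_digit]
  rw [pvOfStr_toList, PySem.Str.toList_join]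
  rw [show ("".toList) = ([] : List Char) from rfl]
  rw [pvJoin_nil_flatten, List.map_map]
  congr 2
  congr 1
  apply List.map_congr_left
  intro i hi
  have hm := pvALoop_mem d num i (List.mem_reverse.mp hi)
  simp only [Function.comp_apply, PySem.Int.toList_toStr]
  rw [pvSt_lookup d i hd0 hd9 hm.1 hm.2]

-- B's character loop as a flattened map
lemma pvB_fold (L : Int) (hL : 0 ≤ L) (g : Int → List Char) :
    (PySem.List.pyRange 0 L).foldl (fun cs i => cs ++ g i) []
      = ((List.range L.toNat).map (fun j => g ((j : Nat) : Int))).flatten := by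
  conv_lhs => rw [show L = ((L.toNat : Nat) : Int) from by omega]
  rw [PySem.List.pyRange_zero_natCast, PySem.List.foldl_append_eq_flatMap,
    List.nil_append, List.flatMap_def, List.map_map]
  simp [Function.comp_def]

-- B's result as characters, d ≠ 0
lemma pvB_chars1 (num d : Int) (hd : d ≠ 0) :
    compute_digit_alt num d =
      (PySem.Int.ofChars?
        (((pvBList num (pvBLen num 1).toNat).map (fun i => PySem.Int.toChars (pvBump d i))).flatten)).getD 0 := by
  have hK := pvBLen_pos num 1 (by norm_num)
  simp only [compute_digit_alt, if_pos hd]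
  rw [pvB_fold _ (by omega)]
  congr 2
  unfold pvBList
  rw [List.map_map]
  congr 1
  apply List.map_congr_left
  intro j hj
  simp only [List.mem_range] at hj
  simp only [Function.comp_apply]
  have he : ((pvBLen num 1) - 1 - ((j : Nat) : Int)).toNat = (pvBLen num 1).toNat - 1 - j := by
    omega
  rw [he]
  have hp : (0:Int) < 9 ^ ((pvBLen num 1).toNat - 1 - j) := by positivity
  rw [PySem.Int.floordiv_eq_ediv_of_pos hp, PySem.Int.mod_eq_emod_of_pos (by norm_num)]
  simp only [pvBump, if_neg hd]

-- B's result as characters, d = 0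
lemma pvB_chars0 (num : Int) :
    compute_digit_alt num 0 =
      (PySem.Int.ofChars?
        (((pvBList (num - pvS (pvBLen0 num 1).toNat - 1) (pvBLen0 num 1).toNat).map
          (fun i => PySem.Int.toChars (pvBump 0 i))).flatten)).getD 0 := by
  have hK := pvBLen0_pos num 1 (by norm_num)
  simp only [compute_digit_alt]
  rw [if_neg (show ¬((0:Int) ≠ 0) by simp)]
  rw [pvSfd]
  rw [pvB_fold _ (by omega)]
  congr 2
  unfold pvBList
  rw [List.map_map]
  congr 1
  apply List.map_congr_left
  intro j hj
  simp only [List.mem_range] at hj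
  simp only [Function.comp_apply]
  have he : ((pvBLen0 num 1) - 1 - ((j : Nat) : Int)).toNat = (pvBLen0 num 1).toNat - 1 - j := by
    omega
  rw [he]
  have hp : (0:Int) < 9 ^ ((pvBLen0 num 1).toNat - 1 - j) := by positivity
  rw [PySem.Int.floordiv_eq_ediv_of_pos hp, PySem.Int.mod_eq_emod_of_pos (by norm_num)]
  simp [pvBump]

-- ===== VERDICT (by name: the statement is the Claim_ definition above) =====
theorem compute_digit_spec : Claim_equal_compute_digit := by
  intro num d _ hpre
  obtain ⟨h1, hd0, hd9⟩ := hpre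
  unfold Spec_compute_digit
  by_cases hd : d = 0
  · subst hd
    rw [pvA_chars num 0 (by norm_num) (by norm_num), pvB_chars0 num]
    have hK := pvBLen0_spec num 1 (by norm_num) (by show pvS 1 < num; rw [show pvS 1 = 0 from rfl]; omega)
    rw [pvM2 (pvBLen0 num 1).toNat num hK.2.1 hK.2.2]
  · rw [pvA_chars num d hd0 hd9, pvB_chars1 num d hd]
    have hK := pvBLen_spec num 1 (by norm_num) (by show (9:Int) ^ ((1:Int).toNat - 1) ≤ num; norm_num; omega)
    obtain ⟨hKL, hlow, hhigh⟩ := hK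
    have hk1 : (pvBLen num 1).toNat = ((pvBLen num 1).toNat - 1) + 1 := by omega
    rw [pvM1 d hd ((pvBLen num 1).toNat - 1) num hlow (by rw [← hk1]; exact hhigh)]
    rw [← hk1]
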